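-- pv_equiv track=rewrite | github.com/Dusker-H/Python-Algorithm | Greedy algorithm/1080(7.31).py | min_operations_to_transform
-- ===== SOURCE A (Python) =====
-- def flip(matrix, x, y):
--     for i in range(x, x+3):
--         for j in range(y, y+3):
--             matrix[i][j] = 1 - matrix[i][j]
--
-- def min_operations_to_transform(A, B, N, M):
--     operations = 0
--
--     # 범위를 다음과 같이 조절
--     for i in range(N-2):
--         for j in range(M-2):
--             if A[i][j]!=B[i][j]:
--                 flip(A, i, j)
--                 operations +=1
--
--     for i in range(N):
--         for j in range(M):
--             if A[i][j] != B[i][j]: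
--                 return -1
--
--     return operations
-- ===== SOURCE B (Python) =====
-- def min_operations_to_transform(A, B, N, M):
--     # Tracks greedy 3x3 flip decisions in a set of corner coordinates and evaluates
--     # each cell's effective value by counting covering flips in its 3x3 corner window;
--     # never mutates A (A's in-place mutation of its argument is not reproduced).
--     flipped = set()
--     operations = 0
--     mismatch = False
--     for i in range(N):
--         for j in range(M):
--             c = 0
--             for a in range(i - 2, i + 1):
--                 for b in range(j - 2, j + 1):
--                     if (a, b) in flipped:
--                         c += 1
--             eff = A[i][j] if c % 2 == 0 else 1 - A[i][j]
--             if i < N - 2 and j < M - 2 and eff != B[i][j]: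
--                 flipped.add((i, j))
--                 operations += 1
--                 eff = 1 - eff
--             if eff != B[i][j]:
--                 mismatch = True
--     return -1 if mismatch else operations
-- ===== Notes on version B (the rewrite author's own statement) =====
-- stated objective: alternative
-- what changed: B never mutates the matrix: instead of physically toggling 9 cells per flip, it records flip corners in a set and computes each cell's effective value in a single pass by counting recorded corners in the cell's 3x3 window, folding the decision pass and the verification pass into one scan.
-- outside the precondition, e.g. on min_operations_to_transform([[0]], [[1]], 1, 2): A returns -1, B raises IndexError
import Mathlib
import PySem

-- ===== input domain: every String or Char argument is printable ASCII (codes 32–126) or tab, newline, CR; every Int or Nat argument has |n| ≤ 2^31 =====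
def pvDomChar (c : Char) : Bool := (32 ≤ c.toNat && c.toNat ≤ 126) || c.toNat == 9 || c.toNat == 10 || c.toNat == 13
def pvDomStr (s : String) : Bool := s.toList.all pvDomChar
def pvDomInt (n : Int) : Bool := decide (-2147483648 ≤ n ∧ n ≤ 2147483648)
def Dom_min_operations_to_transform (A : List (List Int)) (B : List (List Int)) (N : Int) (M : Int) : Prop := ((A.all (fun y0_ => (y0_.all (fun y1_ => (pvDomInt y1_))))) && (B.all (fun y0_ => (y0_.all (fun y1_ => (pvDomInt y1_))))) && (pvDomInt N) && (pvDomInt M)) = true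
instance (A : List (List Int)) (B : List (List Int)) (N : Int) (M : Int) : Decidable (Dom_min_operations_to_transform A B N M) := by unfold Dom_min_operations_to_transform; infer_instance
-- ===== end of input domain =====

-- B replaces A's in-place 3x3 matrix flipping with a pure one-pass scan that records greedy
-- flip corners in a set and evaluates each cell by counting covering corners in its 3x3 window
-- (alternative algorithm, same asymptotic cost).  Python A mutates its argument A in place;
-- the equivalence proved here is about the RETURN value only (the ports are pure).

-- ===== PORT A =====
-- A[i][j] read; total form (junk default where Python would raise; such inputs are outside Pre_)
def pvGetIJ (m : List (List Int)) (i j : Int) : Int :=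
  PySem.List.pyGetD (PySem.List.pyGetD m i []) j 0

-- flip(matrix, x, y): toggles the 3x3 block, cell by cell, in loop order
def pvFlip (m : List (List Int)) (x y : Int) : List (List Int) :=
  (PySem.List.pyRange x (x + 3) 1).foldl (fun m i =>
    (PySem.List.pyRange y (y + 3) 1).foldl (fun m j =>
      PySem.List.pySetD m i
        (PySem.List.pySetD (PySem.List.pyGetD m i []) j (1 - pvGetIJ m i j))) m) m

-- body of A's first double loop: if A[i][j] != B[i][j]: flip(A, i, j); operations += 1
def pvAStep (Bm : List (List Int)) (s : List (List Int) × Int) (i j : Int) :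
    List (List Int) × Int :=
  if pvGetIJ s.1 i j ≠ pvGetIJ Bm i j then (pvFlip s.1 i j, s.2 + 1) else s

def min_operations_to_transform (A : List (List Int)) (B : List (List Int)) (N : Int) (M : Int) : Int :=
  let s := (PySem.List.pyRange 0 (N - 2) 1).foldl (fun s i =>
    (PySem.List.pyRange 0 (M - 2) 1).foldl (fun s j => pvAStep B s i j) s) (A, 0)
  -- second double loop with early 'return -1' at the first mismatch
  if (PySem.List.pyRange 0 N 1).any (fun i =>
       (PySem.List.pyRange 0 M 1).any (fun j => decide (pvGetIJ s.1 i j ≠ pvGetIJ B i j)))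
  then -1 else s.2

-- ===== PORT B =====
-- c = number of recorded flip corners in the 3x3 window whose block covers (i, j)
def pvWindowCount (fl : PySem.Set (Int × Int)) (i j : Int) : Int :=
  (PySem.List.pyRange (i - 2) (i + 1) 1).foldl (fun c a =>
    (PySem.List.pyRange (j - 2) (j + 1) 1).foldl (fun c b =>
      if PySem.Set.contains fl (a, b) then c + 1 else c) c) 0

-- body of B's single scan: compute eff, maybe record a flip corner, update mismatch
def pvBStep (A0 Bm : List (List Int)) (N M : Int)
    (s : PySem.Set (Int × Int) × Int × Bool) (i j : Int) :
    PySem.Set (Int × Int) × Int × Bool :=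
  let cnt := pvWindowCount s.1 i j
  let eff0 := if PySem.Int.mod cnt 2 = 0 then pvGetIJ A0 i j else 1 - pvGetIJ A0 i j
  let doFlip : Bool := decide (i < N - 2) && decide (j < M - 2) &&
    decide (eff0 ≠ pvGetIJ Bm i j)
  (if doFlip then PySem.Set.add s.1 (i, j) else s.1,
   if doFlip then s.2.1 + 1 else s.2.1,
   s.2.2 || decide ((if doFlip then 1 - eff0 else eff0) ≠ pvGetIJ Bm i j))

def min_operations_to_transform_alt (A : List (List Int)) (B : List (List Int)) (N : Int) (M : Int) : Int :=
  let s := (PySem.List.pyRange 0 N 1).foldl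
    (fun (s : PySem.Set (Int × Int) × Int × Bool) i =>
      (PySem.List.pyRange 0 M 1).foldl (fun s j => pvBStep A B N M s i j) s)
    (PySem.Set.empty, 0, false)
  if s.2.2 then -1 else s.2.1

-- ===== PRECONDITION & SPEC =====
-- All reads and writes stay in range: either both loop ranges are empty (N <= 0 or M <= 0),
-- or the first N rows of A and B exist and have length >= M.  This excludes inputs where A
-- happens to return -1 at an early mismatch before reaching an out-of-range cell (see the
-- claim's cites for an example).
def pvShape (m : List (List Int)) (N M : Int) : Prop :=
  N ≤ (m.length : Int) ∧ ∀ k : Nat, k < N.toNat → M ≤ ((m.getD k []).length : Int)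

def Pre_min_operations_to_transform (A : List (List Int)) (B : List (List Int)) (N : Int) (M : Int) : Prop :=
  N ≤ 0 ∨ M ≤ 0 ∨ (pvShape A N M ∧ pvShape B N M)

instance (A : List (List Int)) (B : List (List Int)) (N : Int) (M : Int) : Decidable (Pre_min_operations_to_transform A B N M) := by
  unfold Pre_min_operations_to_transform pvShape; infer_instance

def pvWitness_min_operations_to_transform : List (List Int) × List (List Int) × Int × Int :=
  ([[1, 0, 0], [0, 1, 0], [0, 0, 1]], [[0, 1, 1], [1, 0, 1], [1, 1, 0]], 3, 3)

def Spec_min_operations_to_transform (A : List (List Int)) (B : List (List Int)) (N : Int) (M : Int) (out : Int) : Prop := out = min_operations_to_transform_alt A B N M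
instance (A : List (List Int)) (B : List (List Int)) (N : Int) (M : Int) (out : Int) : Decidable (Spec_min_operations_to_transform A B N M out) := by unfold Spec_min_operations_to_transform; infer_instance

-- ===== CLAIM (what is proved, stated in full; the proofs are below) =====
def Claim_equal_min_operations_to_transform : Prop := ∀ (A : List (List Int)) (B : List (List Int)) (N : Int) (M : Int), Dom_min_operations_to_transform A B N M → Pre_min_operations_to_transform A B N M → Spec_min_operations_to_transform A B N M (min_operations_to_transform A B N M)

-- ===== LEMMAS AND PROOFS =====

-- proof-side vocabulary
def pvUpd (m : List (List Int)) (i j : Int) (v : Int) : List (List Int) :=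
  PySem.List.pySetD m i (PySem.List.pySetD (PySem.List.pyGetD m i []) j v)
def pvPairs (a b x y : Int) : List (Int × Int) :=
  (PySem.List.pyRange a b 1).flatMap (fun i => (PySem.List.pyRange x y 1).map (fun j => (i, j)))
def pvCell (N M : Int) (c : Int × Int) : Prop := 0 ≤ c.1 ∧ c.1 < N ∧ 0 ≤ c.2 ∧ c.2 < M
def pvCorner (N M : Int) (c : Int × Int) : Prop := 0 ≤ c.1 ∧ c.1 + 3 ≤ N ∧ 0 ≤ c.2 ∧ c.2 + 3 ≤ M
abbrev pvWin (f c : Int × Int) : Prop := f.1 ≤ c.1 ∧ c.1 ≤ f.1 + 2 ∧ f.2 ≤ c.2 ∧ c.2 ≤ f.2 + 2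
def pvLex (c d : Int × Int) : Prop := c.1 < d.1 ∨ (c.1 = d.1 ∧ c.2 < d.2)
def pvCov (S : List (Int × Int)) (c : Int × Int) : Nat := S.countP (fun f => decide (pvWin f c))
def pvEff (A0 : List (List Int)) (S : List (Int × Int)) (c : Int × Int) : Int :=
  if pvCov S c % 2 = 0 then pvGetIJ A0 c.1 c.2 else 1 - pvGetIJ A0 c.1 c.2
def pvToggles (cells : List (Int × Int)) (m : List (List Int)) : List (List Int) :=
  cells.foldl (fun m c => pvUpd m c.1 c.2 (1 - pvGetIJ m c.1 c.2)) m
def pvApply (A0 : List (List Int)) (S : List (Int × Int)) : List (List Int) :=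
  S.foldl (fun m c => pvFlip m c.1 c.2) A0
def pvDec (A0 Bm : List (List Int)) : List (Int × Int) → List (Int × Int) → List (Int × Int)
  | S, [] => S
  | S, c :: r => pvDec A0 Bm (if pvEff A0 S c ≠ pvGetIJ Bm c.1 c.2 then S ++ [c] else S) r
def pvDecAll (A0 Bm : List (List Int)) (N M : Int) :
    List (Int × Int) → List (Int × Int) → List (Int × Int)
  | S, [] => S
  | S, c :: r => pvDecAll A0 Bm N M
      (if c.1 < N - 2 ∧ c.2 < M - 2 ∧ pvEff A0 S c ≠ pvGetIJ Bm c.1 c.2 then S ++ [c] else S) r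

theorem pvFoldlNested {α β γ : Type} (xs : List α) (ys : List β) (g : γ → α → β → γ) (init : γ) :
    xs.foldl (fun s i => ys.foldl (fun s j => g s i j) s) init
      = (xs.flatMap (fun i => ys.map (fun j => (i, j)))).foldl (fun s p => g s p.1 p.2) init := by
  induction xs generalizing init with
  | nil => rfl
  | cons a l ih =>
    simp only [List.foldl_cons, List.flatMap_cons, List.foldl_append, List.foldl_map]
    exact ih _

theorem pvAnyNested {α β : Type} (xs : List α) (ys : List β) (g : α → β → Bool) :
    xs.any (fun i => ys.any (fun j => g i j))
      = (xs.flatMap (fun i => ys.map (fun j => (i, j)))).any (fun p => g p.1 p.2) := by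
  induction xs with
  | nil => rfl
  | cons a l ih =>
    simp only [List.any_cons, List.flatMap_cons, List.any_append, List.any_map, ih]
    rfl

theorem pvAnyCongr {α : Type} (l : List α) (f g : α → Bool) (h : ∀ x ∈ l, f x = g x) :
    l.any f = l.any g := by
  induction l with
  | nil => rfl
  | cons a t ih =>
    simp only [List.any_cons, h a (by simp)]
    rw [ih (fun x hx => h x (by simp [hx]))]

theorem pvFlatMapCongr {α β : Type} (l : List α) (f g : α → List β) (h : ∀ x ∈ l, f x = g x) :
    l.flatMap f = l.flatMap g := by
  induction l with
  | nil => rfl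
  | cons a t ih =>
    simp only [List.flatMap_cons, h a (by simp)]
    rw [ih (fun x hx => h x (by simp [hx]))]

theorem pvFilterFlatMap {α β : Type} (l : List α) (f : α → List β) (p : β → Bool) :
    (l.flatMap f).filter p = l.flatMap (fun x => (f x).filter p) := by
  induction l with
  | nil => rfl
  | cons a t ih => simp [List.filter_append, ih]

theorem pvCountPMemComm (l w : List (Int × Int)) (hl : l.Nodup) (hw : w.Nodup) :
    w.countP (fun x => decide (x ∈ l)) = l.countP (fun x => decide (x ∈ w)) := by
  rw [List.countP_eq_length_filter, List.countP_eq_length_filter]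
  refine List.Perm.length_eq ?_
  refine (List.perm_ext_iff_of_nodup (hw.filter _) (hl.filter _)).2 ?_
  intro a; simp; tauto

theorem pvMemPairs (a b x y : Int) (c : Int × Int) :
    c ∈ pvPairs a b x y ↔ (a ≤ c.1 ∧ c.1 < b ∧ x ≤ c.2 ∧ c.2 < y) := by
  obtain ⟨i, j⟩ := c
  simp [pvPairs, PySem.List.mem_pyRange_one]
  tauto

theorem pvPairsNodup (a b x y : Int) : (pvPairs a b x y).Nodup := by
  rw [pvPairs, List.nodup_flatMap]
  refine ⟨fun i _ => List.Nodup.map (fun j k h => by simpa using h : Function.Injective fun j => ((i, j) : Int × Int)) (PySem.List.nodup_pyRange_one x y), ?_⟩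
  refine List.Pairwise.imp ?_ (PySem.List.nodup_pyRange_one a b)
  intro i i' hne z hz hz'
  simp only [List.mem_map] at hz hz'
  obtain ⟨j, _, rfl⟩ := hz
  obtain ⟨j', _, e⟩ := hz'
  have hii : i' = i := by simpa using congrArg Prod.fst e
  exact hne hii.symm

theorem pvPairwiseFlatMapLex (xs ys : List Int) (hx : xs.Pairwise (· < ·)) (hy : ys.Pairwise (· < ·)) :
    ((xs.flatMap fun i => ys.map fun j => ((i, j) : Int × Int)).Pairwise pvLex) := by
  induction xs with
  | nil => simp
  | cons a t ih =>
    rw [List.flatMap_cons, List.pairwise_append]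
    refine ⟨?_, ih hx.of_cons, ?_⟩
    · rw [List.pairwise_map]
      exact hy.imp (fun h => Or.inr ⟨rfl, h⟩)
    · intro p hp q hq
      simp only [List.mem_map] at hp
      obtain ⟨j, _, rfl⟩ := hp
      simp only [List.mem_flatMap, List.mem_map] at hq
      obtain ⟨i', hi', j', _, rfl⟩ := hq
      exact Or.inl (List.rel_of_pairwise_cons hx hi')

theorem pvPairsPairwiseLex (a b x y : Int) : (pvPairs a b x y).Pairwise pvLex :=
  pvPairwiseFlatMapLex _ _ (PySem.List.pairwise_lt_pyRange_one a b) (PySem.List.pairwise_lt_pyRange_one x y)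

theorem pvRangeFilterLt (N t : Int) (h : t ≤ N) :
    (PySem.List.pyRange 0 N 1).filter (fun j => decide (j < t)) = PySem.List.pyRange 0 t 1 := by
  rcases (by omega : t ≤ 0 ∨ 0 < t) with ht | ht
  · rw [PySem.List.pyRange_one_eq_nil ht, List.filter_eq_nil_iff]
    intro j hj
    rw [PySem.List.mem_pyRange_one] at hj
    simp; omega
  · rw [PySem.List.pyRange_one_append 0 t N (by omega) h, List.filter_append]
    have h1 : (PySem.List.pyRange 0 t 1).filter (fun j => decide (j < t)) = PySem.List.pyRange 0 t 1 := by
      rw [List.filter_eq_self]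
      intro j hj; rw [PySem.List.mem_pyRange_one] at hj; simp; omega
    have h2 : (PySem.List.pyRange t N 1).filter (fun j => decide (j < t)) = [] := by
      rw [List.filter_eq_nil_iff]
      intro j hj; rw [PySem.List.mem_pyRange_one] at hj; simp; omega
    rw [h1, h2, List.append_nil]

theorem pvPairsFilter (N M : Int) :
    (pvPairs 0 N 0 M).filter (fun c => decide (c.1 < N - 2) && decide (c.2 < M - 2))
      = pvPairs 0 (N - 2) 0 (M - 2) := by
  rw [pvPairs, pvFilterFlatMap]
  rcases (by omega : N - 2 ≤ 0 ∨ 0 < N - 2) with hN | hN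
  · rw [pvPairs, PySem.List.pyRange_one_eq_nil hN, List.flatMap_nil]
    rw [List.flatMap_eq_nil_iff]
    intro i hi
    rw [PySem.List.mem_pyRange_one] at hi
    rw [List.filter_eq_nil_iff]
    intro p hp
    simp only [List.mem_map] at hp
    obtain ⟨j, _, rfl⟩ := hp
    intro hcon
    simp only [Bool.and_eq_true, decide_eq_true_eq] at hcon
    omega
  · rw [PySem.List.pyRange_one_append 0 (N - 2) N (by omega) (by omega), List.flatMap_append]
    have h2 : (PySem.List.pyRange (N - 2) N 1).flatMap
        (fun i => ((PySem.List.pyRange 0 M 1).map (fun j => (i, j))).filter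
          (fun c => decide (c.1 < N - 2) && decide (c.2 < M - 2))) = [] := by
      rw [List.flatMap_eq_nil_iff]
      intro i hi
      rw [PySem.List.mem_pyRange_one] at hi
      rw [List.filter_eq_nil_iff]
      intro p hp
      simp only [List.mem_map] at hp
      obtain ⟨j, _, rfl⟩ := hp
      intro hcon
      simp only [Bool.and_eq_true, decide_eq_true_eq] at hcon
      omega
    rw [h2, List.append_nil, pvPairs]
    refine pvFlatMapCongr _ _ _ ?_
    intro i hi
    rw [PySem.List.mem_pyRange_one] at hi
    rw [List.filter_map]
    have : ((fun c => decide (c.1 < N - 2) && decide (c.2 < M - 2)) ∘ (fun j => ((i, j) : Int × Int)))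
        = fun j => decide (j < M - 2) := by
      funext j
      simp [Function.comp]
      omega
    rw [this, pvRangeFilterLt M (M - 2) (by omega)]

theorem pvUpdLength (m : List (List Int)) (i j v : Int) : (pvUpd m i j v).length = m.length := by
  unfold pvUpd
  exact PySem.List.length_pySetD _ _ _

theorem pvUpdRowLength (m : List (List Int)) (i j v : Int) (hi : 0 ≤ i) (hj : 0 ≤ j) (k : Nat) :
    ((pvUpd m i j v).getD k []).length = (m.getD k []).length := by
  unfold pvUpd
  rw [PySem.List.pyGetD_of_nonneg _ _ hi, PySem.List.pySetD_of_nonneg _ _ hj,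
    PySem.List.pySetD_of_nonneg _ _ hi]
  rcases Nat.lt_or_ge i.toNat m.length with hlen | hlen
  · by_cases hk : k = i.toNat
    · subst hk
      rw [List.getD_eq_getElem?_getD, List.getElem?_set_self (by omega), Option.getD_some,
        List.length_set, List.getD_eq_getElem?_getD]
    · rw [List.getD_eq_getElem?_getD, List.getElem?_set_ne (by omega), ← List.getD_eq_getElem?_getD]
  · rw [List.set_eq_of_length_le (by omega)]

theorem pvGetIJ_upd (m : List (List Int)) {i j i' j' : Int} (v : Int)
    (hi : 0 ≤ i) (hil : i.toNat < m.length) (hj : 0 ≤ j)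
    (hjl : j.toNat < (m.getD i.toNat []).length) (hi' : 0 ≤ i') (hj' : 0 ≤ j') :
    pvGetIJ (pvUpd m i j v) i' j' = if i' = i ∧ j' = j then v else pvGetIJ m i' j' := by
  unfold pvGetIJ pvUpd
  rw [PySem.List.pyGetD_of_nonneg _ _ hi, PySem.List.pySetD_of_nonneg _ _ hj,
    PySem.List.pySetD_of_nonneg _ _ hi, PySem.List.pyGetD_of_nonneg _ _ hi']
  by_cases hii : i' = i
  · subst hii
    rw [List.getD_eq_getElem?_getD, List.getElem?_set_self (by omega), Option.getD_some]
    rw [PySem.List.pyGetD_of_nonneg _ _ hj']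
    by_cases hjj : j' = j
    · subst hjj
      rw [List.getD_eq_getElem?_getD, List.getElem?_set_self (by omega), Option.getD_some]
      simp
    · rw [List.getD_eq_getElem?_getD, List.getElem?_set_ne (by omega), ← List.getD_eq_getElem?_getD]
      simp [hjj, PySem.List.pyGetD_of_nonneg, hi', hj', List.getD_eq_getElem?_getD]
  · rw [List.getD_eq_getElem?_getD, List.getElem?_set_ne (by omega), ← List.getD_eq_getElem?_getD]
    simp [hii, PySem.List.pyGetD_of_nonneg, hi', hj', List.getD_eq_getElem?_getD]

theorem pvShapeCellBounds {m : List (List Int)} {N M : Int} (hm : pvShape m N M)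
    {c : Int × Int} (hc : pvCell N M c) :
    c.1.toNat < m.length ∧ c.2.toNat < (m.getD c.1.toNat []).length := by
  obtain ⟨h1, h2⟩ := hm
  obtain ⟨hc1, hc2, hc3, hc4⟩ := hc
  have hr := h2 c.1.toNat (by omega)
  omega

theorem pvUpdShape {m : List (List Int)} {N M : Int} (hm : pvShape m N M)
    {i j : Int} (hi : 0 ≤ i) (hj : 0 ≤ j) (v : Int) : pvShape (pvUpd m i j v) N M := by
  refine ⟨?_, ?_⟩
  · rw [pvUpdLength]; exact hm.1
  · intro k hk
    rw [pvUpdRowLength m i j v hi hj k]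
    exact hm.2 k hk

theorem pvTogglesShape {cells : List (Int × Int)} {m : List (List Int)} {N M : Int}
    (hm : pvShape m N M) (hc : ∀ c ∈ cells, 0 ≤ c.1 ∧ 0 ≤ c.2) :
    pvShape (pvToggles cells m) N M := by
  induction cells generalizing m with
  | nil => exact hm
  | cons c r ih =>
    have hc0 := hc c (by simp)
    exact ih (pvUpdShape hm hc0.1 hc0.2 _) (fun x hx => hc x (by simp [hx]))

theorem pvGetIJ_toggles {cells : List (Int × Int)} {m : List (List Int)} {N M : Int}
    (hm : pvShape m N M) (hcells : ∀ c ∈ cells, pvCell N M c) (hnd : cells.Nodup)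
    {c' : Int × Int} (hc' : pvCell N M c') :
    pvGetIJ (pvToggles cells m) c'.1 c'.2
      = if c' ∈ cells then 1 - pvGetIJ m c'.1 c'.2 else pvGetIJ m c'.1 c'.2 := by
  induction cells generalizing m with
  | nil => simp [pvToggles]
  | cons c r ih =>
    have hc0 : pvCell N M c := hcells c (by simp)
    have hb := pvShapeCellBounds hm hc0
    have hm1 : pvShape (pvUpd m c.1 c.2 (1 - pvGetIJ m c.1 c.2)) N M :=
      pvUpdShape hm hc0.1 hc0.2.2.1 _
    have step : pvToggles (c :: r) m
        = pvToggles r (pvUpd m c.1 c.2 (1 - pvGetIJ m c.1 c.2)) := rfl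
    rw [step, ih hm1 (fun x hx => hcells x (by simp [hx])) hnd.of_cons]
    have hupd := pvGetIJ_upd m (i := c.1) (j := c.2) (i' := c'.1) (j' := c'.2)
      (1 - pvGetIJ m c.1 c.2) hc0.1 hb.1 hc0.2.2.1 hb.2 hc'.1 hc'.2.2.1
    by_cases h2 : c' = c
    · subst h2
      have hnr : c' ∉ r := by
        intro hmem; exact (List.nodup_cons.mp hnd).1 hmem
      simp only [hnr, if_false, List.mem_cons, true_or, if_true, hupd]
      simp
    · have hcond : ¬(c'.1 = c.1 ∧ c'.2 = c.2) := by
        intro ⟨e1, e2⟩; exact h2 (Prod.ext e1 e2)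
      rw [hupd]
      simp only [hcond, if_false]
      by_cases h1 : c' ∈ r
      · simp [h1, List.mem_cons]
      · have : c' ∉ c :: r := by simp [h1, h2]
        simp [h1, this]

theorem pvFlipEqToggles (m : List (List Int)) (x y : Int) :
    pvFlip m x y = pvToggles (pvPairs x (x + 3) y (y + 3)) m := by
  unfold pvFlip pvToggles pvPairs pvUpd
  exact pvFoldlNested _ _ (fun m i j =>
    PySem.List.pySetD m i (PySem.List.pySetD (PySem.List.pyGetD m i []) j (1 - pvGetIJ m i j))) m

theorem pvFlipShape {m : List (List Int)} {N M x y : Int} (hm : pvShape m N M)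
    (hx : 0 ≤ x) (hy : 0 ≤ y) : pvShape (pvFlip m x y) N M := by
  rw [pvFlipEqToggles]
  refine pvTogglesShape hm ?_
  intro c hc
  rw [pvMemPairs] at hc
  omega

theorem pvGetIJ_flip {m : List (List Int)} {N M x y : Int} (hm : pvShape m N M)
    (hco : pvCorner N M (x, y)) {c' : Int × Int} (hc' : pvCell N M c') :
    pvGetIJ (pvFlip m x y) c'.1 c'.2
      = if pvWin (x, y) c' then 1 - pvGetIJ m c'.1 c'.2 else pvGetIJ m c'.1 c'.2 := by
  obtain ⟨hx1, hx2, hy1, hy2⟩ := hco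
  rw [pvFlipEqToggles]
  rw [pvGetIJ_toggles hm (fun c hc => by rw [pvMemPairs] at hc; exact ⟨by omega, by omega, by omega, by omega⟩)
    (pvPairsNodup _ _ _ _) hc']
  have : c' ∈ pvPairs x (x + 3) y (y + 3) ↔ pvWin (x, y) c' := by
    rw [pvMemPairs]; unfold pvWin; constructor <;> (intro h; exact ⟨by omega, by omega, by omega, by omega⟩)
  simp only [this]

theorem pvGetIJ_apply {A0 : List (List Int)} {N M : Int} {S : List (Int × Int)}
    (h0 : pvShape A0 N M) (hS : ∀ c ∈ S, pvCorner N M c) {c' : Int × Int} (hc' : pvCell N M c') :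
    pvGetIJ (pvApply A0 S) c'.1 c'.2 = pvEff A0 S c' := by
  induction S generalizing A0 with
  | nil => simp [pvApply, pvEff, pvCov]
  | cons f S ih =>
    have hf : pvCorner N M f := hS f (by simp)
    have step : pvApply A0 (f :: S) = pvApply (pvFlip A0 f.1 f.2) S := rfl
    rw [step, ih (pvFlipShape h0 hf.1 hf.2.2.1) (fun x hx => hS x (by simp [hx]))]
    have hflip := pvGetIJ_flip (x := f.1) (y := f.2) h0 hf hc'
    unfold pvEff
    have hcov : pvCov (f :: S) c' = (if pvWin f c' then 1 else 0) + pvCov S c' := by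
      unfold pvCov
      rw [List.countP_cons]
      by_cases hw : pvWin f c'
      · rw [if_pos hw, if_pos (decide_eq_true hw)]
        omega
      · rw [if_neg hw, if_neg (by simp only [decide_eq_true_eq]; exact hw)]
        omega
    rw [hcov, hflip]
    by_cases hw : pvWin f c'
    · have hw' : pvWin (f.1, f.2) c' := hw
      rw [if_pos hw, if_pos hw']
      by_cases hp : pvCov S c' % 2 = 0
      · have h1 : ¬((1 + pvCov S c') % 2 = 0) := by omega
        rw [if_neg h1, if_pos hp]
      · have h1 : (1 + pvCov S c') % 2 = 0 := by omega
        rw [if_pos h1, if_neg hp]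
        ring
    · have hw' : ¬ pvWin (f.1, f.2) c' := hw
      rw [if_neg hw, if_neg hw']
      simp

theorem pvCovAppendAfter (S T : List (Int × Int)) (c : Int × Int)
    (hT : ∀ f ∈ T, pvLex c f) : pvCov (S ++ T) c = pvCov S c := by
  unfold pvCov
  rw [List.countP_append]
  have : T.countP (fun f => decide (pvWin f c)) = 0 := by
    rw [List.countP_eq_zero]
    intro f hf
    have := hT f hf
    unfold pvLex at this
    simp only [decide_eq_true_eq]
    unfold pvWin
    omega
  omega

theorem pvEffAppendAfter (A0 : List (List Int)) (S T : List (Int × Int)) (c : Int × Int)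
    (hT : ∀ f ∈ T, pvLex c f) : pvEff A0 (S ++ T) c = pvEff A0 S c := by
  unfold pvEff
  rw [pvCovAppendAfter S T c hT]

theorem pvEffAppendSelf (A0 : List (List Int)) (S : List (Int × Int)) (c : Int × Int) :
    pvEff A0 (S ++ [c]) c = 1 - pvEff A0 S c := by
  have hwin : pvWin c c := by unfold pvWin; omega
  have hcov : pvCov (S ++ [c]) c = pvCov S c + 1 := by
    unfold pvCov
    rw [List.countP_append]
    simp [hwin]
  unfold pvEff
  rw [hcov]
  by_cases hp : pvCov S c % 2 = 0
  · have : ¬((pvCov S c + 1) % 2 = 0) := by omega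
    simp [hp, this]
  · have : (pvCov S c + 1) % 2 = 0 := by omega
    simp [hp, this]

theorem pvDecSublist (A0 Bm : List (List Int)) (cells S : List (Int × Int)) :
    ∃ T, pvDec A0 Bm S cells = S ++ T ∧ T.Sublist cells := by
  induction cells generalizing S with
  | nil => exact ⟨[], by simp [pvDec]⟩
  | cons c r ih =>
    by_cases h : pvEff A0 S c ≠ pvGetIJ Bm c.1 c.2
    · obtain ⟨T, hT, hsub⟩ := ih (S ++ [c])
      refine ⟨c :: T, ?_, hsub.cons₂ c⟩
      simp only [pvDec, if_pos h]
      rw [hT, List.append_assoc]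
      rfl
    · obtain ⟨T, hT, hsub⟩ := ih S
      exact ⟨T, by simp only [pvDec, if_neg h]; exact hT, hsub.cons c⟩

theorem pvDecAllSublist (A0 Bm : List (List Int)) (N M : Int) (cells S : List (Int × Int)) :
    ∃ T, pvDecAll A0 Bm N M S cells = S ++ T ∧ T.Sublist cells := by
  induction cells generalizing S with
  | nil => exact ⟨[], by simp [pvDecAll]⟩
  | cons c r ih =>
    by_cases h : c.1 < N - 2 ∧ c.2 < M - 2 ∧ pvEff A0 S c ≠ pvGetIJ Bm c.1 c.2
    · obtain ⟨T, hT, hsub⟩ := ih (S ++ [c])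
      refine ⟨c :: T, ?_, hsub.cons₂ c⟩
      simp only [pvDecAll, if_pos h]
      rw [hT, List.append_assoc]
      rfl
    · obtain ⟨T, hT, hsub⟩ := ih S
      exact ⟨T, by simp only [pvDecAll, if_neg h]; exact hT, hsub.cons c⟩

theorem pvDecAllEqDec (A0 Bm : List (List Int)) (N M : Int) (cells S : List (Int × Int)) :
    pvDecAll A0 Bm N M S cells
      = pvDec A0 Bm S (cells.filter (fun c => decide (c.1 < N - 2) && decide (c.2 < M - 2))) := by
  induction cells generalizing S with
  | nil => rfl
  | cons c r ih =>
    by_cases hco : c.1 < N - 2 ∧ c.2 < M - 2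
    · have hfil : (c :: r).filter (fun c => decide (c.1 < N - 2) && decide (c.2 < M - 2))
          = c :: r.filter (fun c => decide (c.1 < N - 2) && decide (c.2 < M - 2)) := by
        rw [List.filter_cons_of_pos (by simp [hco.1, hco.2])]
      rw [hfil]
      by_cases heff : pvEff A0 S c ≠ pvGetIJ Bm c.1 c.2
      · have hg : c.1 < N - 2 ∧ c.2 < M - 2 ∧ pvEff A0 S c ≠ pvGetIJ Bm c.1 c.2 :=
          ⟨hco.1, hco.2, heff⟩
        simp only [pvDecAll, pvDec, if_pos hg, if_pos heff]
        exact ih (S ++ [c])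
      · have hg : ¬(c.1 < N - 2 ∧ c.2 < M - 2 ∧ pvEff A0 S c ≠ pvGetIJ Bm c.1 c.2) := by
          intro h; exact heff h.2.2
        simp only [pvDecAll, pvDec, if_neg hg, if_neg heff]
        exact ih S
    · have hfil : (c :: r).filter (fun c => decide (c.1 < N - 2) && decide (c.2 < M - 2))
          = r.filter (fun c => decide (c.1 < N - 2) && decide (c.2 < M - 2)) := by
        rw [List.filter_cons_of_neg (by simp; omega)]
      have hg : ¬(c.1 < N - 2 ∧ c.2 < M - 2 ∧ pvEff A0 S c ≠ pvGetIJ Bm c.1 c.2) := by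
        intro h; exact hco ⟨h.1, h.2.1⟩
      rw [hfil]
      simp only [pvDecAll, if_neg hg]
      exact ih S

theorem pvWindowCountEq (S : List (Int × Int)) (hnd : S.Nodup) (c : Int × Int) :
    pvWindowCount S c.1 c.2 = (pvCov S c : Int) := by
  unfold pvWindowCount
  rw [pvFoldlNested _ _ (fun cnt a b => if PySem.Set.contains S (a, b) then cnt + 1 else cnt) 0]
  rw [PySem.List.foldl_count_if (fun p => PySem.Set.contains S p) _ 0]
  have h1 : (pvPairs (c.1 - 2) (c.1 + 1) (c.2 - 2) (c.2 + 1)).countP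
        (fun p => PySem.Set.contains S p)
      = (pvPairs (c.1 - 2) (c.1 + 1) (c.2 - 2) (c.2 + 1)).countP (fun p => decide (p ∈ S)) := by
    refine List.countP_congr ?_
    intro p _
    simp only [decide_eq_true_eq]
    exact PySem.Set.contains_iff S p
  have h2 := pvCountPMemComm S (pvPairs (c.1 - 2) (c.1 + 1) (c.2 - 2) (c.2 + 1)) hnd
    (pvPairsNodup _ _ _ _)
  have h3 : S.countP (fun x => decide (x ∈ pvPairs (c.1 - 2) (c.1 + 1) (c.2 - 2) (c.2 + 1)))
      = pvCov S c := by
    refine List.countP_congr ?_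
    intro f _
    simp only [decide_eq_true_eq, pvMemPairs]
    unfold pvWin
    constructor ; (intro h; omega) ; (intro h; omega)
  rw [pvPairs] at h1 h2 h3
  rw [h1, h2, h3]
  omega

set_option maxHeartbeats 1000000 in
theorem pvALoop (A0 Bm : List (List Int)) (N M : Int) (h0 : pvShape A0 N M) :
    ∀ (cells S : List (Int × Int)), (∀ c ∈ S, pvCorner N M c) → (∀ c ∈ cells, pvCorner N M c) →
    cells.foldl (fun (s : List (List Int) × Int) c => pvAStep Bm s c.1 c.2)
      (pvApply A0 S, (S.length : Int))
      = (pvApply A0 (pvDec A0 Bm S cells), ((pvDec A0 Bm S cells).length : Int)) := by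
  intro cells
  induction cells with
  | nil => intro S _ _; rfl
  | cons c r ih =>
    intro S hS hcells
    have hcor : pvCorner N M c := hcells c (by simp)
    have hcell : pvCell N M c := by
      obtain ⟨a, b, x, y⟩ := hcor
      exact ⟨a, by omega, x, by omega⟩
    have hguard : pvGetIJ (pvApply A0 S) c.1 c.2 = pvEff A0 S c :=
      pvGetIJ_apply h0 hS hcell
    have hcells' : ∀ x ∈ r, pvCorner N M x := fun x hx => hcells x (by simp [hx])
    by_cases hif : pvEff A0 S c ≠ pvGetIJ Bm c.1 c.2
    · have hd : pvDec A0 Bm S (c :: r) = pvDec A0 Bm (S ++ [c]) r := by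
        simp only [pvDec, if_pos hif]
      have hstepA : pvAStep Bm (pvApply A0 S, (S.length : Int)) c.1 c.2
          = (pvApply A0 (S ++ [c]), ((S ++ [c]).length : Int)) := by
        unfold pvAStep
        dsimp only
        rw [if_pos (by rw [hguard]; exact hif)]
        refine Prod.ext ?_ ?_
        · simp [pvApply, List.foldl_append]
        · simp
      rw [hd]
      exact (congrArg (fun st => List.foldl
          (fun (s : List (List Int) × Int) c => pvAStep Bm s c.1 c.2) st r) hstepA).trans
        (ih (S ++ [c]) (by
          intro x hx
          rcases List.mem_append.mp hx with h | h
          · exact hS x h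
          · simp at h; subst h; exact hcor) hcells')
    · have hd : pvDec A0 Bm S (c :: r) = pvDec A0 Bm S r := by
        simp only [pvDec, if_neg hif]
      have hstepA : pvAStep Bm (pvApply A0 S, (S.length : Int)) c.1 c.2
          = (pvApply A0 S, (S.length : Int)) := by
        unfold pvAStep
        dsimp only
        rw [if_neg (by rw [hguard]; simpa using hif)]
      rw [hd]
      exact (congrArg (fun st => List.foldl
          (fun (s : List (List Int) × Int) c => pvAStep Bm s c.1 c.2) st r) hstepA).trans
        (ih S hS hcells')

set_option maxHeartbeats 1000000 in
theorem pvBLoop (A0 Bm : List (List Int)) (N M : Int) :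
    ∀ (R S : List (Int × Int)) (mis : Bool), S.Nodup →
    (∀ c ∈ S, ∀ r ∈ R, pvLex c r) → R.Pairwise pvLex →
    R.foldl (fun (s : PySem.Set (Int × Int) × Int × Bool) c => pvBStep A0 Bm N M s c.1 c.2)
      (S, (S.length : Int), mis)
      = (pvDecAll A0 Bm N M S R, ((pvDecAll A0 Bm N M S R).length : Int),
         mis || R.any (fun c => decide (pvEff A0 (pvDecAll A0 Bm N M S R) c ≠ pvGetIJ Bm c.1 c.2))) := by
  intro R
  induction R with
  | nil => intro S mis _ _ _; simp [pvDecAll]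
  | cons c r ih =>
    intro S mis hnd hSR hpair
    have hcr : ∀ x ∈ r, pvLex c x := fun x hx => List.rel_of_pairwise_cons hpair hx
    have hcS : c ∉ S := by
      intro hc
      have := hSR c hc c (by simp)
      unfold pvLex at this
      omega
    have hcnt : pvWindowCount S c.1 c.2 = (pvCov S c : Int) := pvWindowCountEq S hnd c
    have heff0 : (if PySem.Int.mod (pvWindowCount S c.1 c.2) 2 = 0
        then pvGetIJ A0 c.1 c.2 else 1 - pvGetIJ A0 c.1 c.2) = pvEff A0 S c := by
      rw [hcnt]
      have : PySem.Int.mod (pvCov S c : Int) 2 = ((pvCov S c % 2 : Nat) : Int) := by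
        exact_mod_cast PySem.Int.mod_natCast (pvCov S c) 2
      rw [this]
      unfold pvEff
      by_cases hp : pvCov S c % 2 = 0
      · rw [if_pos (by exact_mod_cast congrArg (Nat.cast : Nat → Int) hp), if_pos hp]
      · have hne : ¬(((pvCov S c % 2 : Nat) : Int) = 0) := by
          intro h
          exact hp (by exact_mod_cast h)
        rw [if_neg hne, if_neg hp]
    set S1 := if c.1 < N - 2 ∧ c.2 < M - 2 ∧ pvEff A0 S c ≠ pvGetIJ Bm c.1 c.2
      then S ++ [c] else S with hS1
    have hstep : pvBStep A0 Bm N M (S, (S.length : Int), mis) c.1 c.2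
        = (S1, (S1.length : Int), mis || decide (pvEff A0 S1 c ≠ pvGetIJ Bm c.1 c.2)) := by
      unfold pvBStep
      dsimp only
      simp only [heff0]
      by_cases hg : c.1 < N - 2 ∧ c.2 < M - 2 ∧ pvEff A0 S c ≠ pvGetIJ Bm c.1 c.2
      · have hb : (decide (c.1 < N - 2) && decide (c.2 < M - 2) &&
            decide (pvEff A0 S c ≠ pvGetIJ Bm c.1 c.2)) = true := by
          simp [hg.1, hg.2.1, hg.2.2]
        rw [hS1, if_pos hg]
        simp only [hb, if_true]
        refine Prod.ext ?_ (Prod.ext ?_ ?_)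
        · exact PySem.Set.add_of_not_mem hcS
        · simp
        · simp only [pvEffAppendSelf A0 S c]
      · have hb : (decide (c.1 < N - 2) && decide (c.2 < M - 2) &&
            decide (pvEff A0 S c ≠ pvGetIJ Bm c.1 c.2)) = false := by
          by_contra hcon
          simp only [Bool.not_eq_false, Bool.and_eq_true, decide_eq_true_eq] at hcon
          exact hg ⟨hcon.1.1, hcon.1.2, hcon.2⟩
        rw [hS1, if_neg hg]
        simp only [hb, if_false, Bool.false_eq_true]
    have hnd1 : S1.Nodup := by
      rw [hS1]
      by_cases hg : c.1 < N - 2 ∧ c.2 < M - 2 ∧ pvEff A0 S c ≠ pvGetIJ Bm c.1 c.2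
      · rw [if_pos hg]
        refine List.Nodup.append hnd (List.nodup_singleton c) ?_
        intro x hxS hxc
        simp only [List.mem_singleton] at hxc
        exact hcS (hxc ▸ hxS)
      · rw [if_neg hg]; exact hnd
    have hmemS1 : ∀ x ∈ S1, x ∈ S ∨ x = c := by
      intro x hx
      rw [hS1] at hx
      by_cases hg : c.1 < N - 2 ∧ c.2 < M - 2 ∧ pvEff A0 S c ≠ pvGetIJ Bm c.1 c.2
      · rw [if_pos hg] at hx
        rcases List.mem_append.mp hx with h | h
        · exact Or.inl h
        · simp at h; exact Or.inr h
      · rw [if_neg hg] at hx; exact Or.inl hx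
    have hSR1 : ∀ x ∈ S1, ∀ y ∈ r, pvLex x y := by
      intro x hx y hy
      rcases hmemS1 x hx with h | h
      · exact hSR x h y (by simp [hy])
      · subst h; exact hcr y hy
    have hdec : pvDecAll A0 Bm N M S (c :: r) = pvDecAll A0 Bm N M S1 r := by
      rw [hS1]
      simp only [pvDecAll]
    have heffc : pvEff A0 S1 c = pvEff A0 (pvDecAll A0 Bm N M S (c :: r)) c := by
      obtain ⟨T, hT, hsub⟩ := pvDecAllSublist A0 Bm N M r S1
      rw [hdec, hT]
      exact (pvEffAppendAfter A0 S1 T c (fun f hf => hcr f (hsub.mem hf))).symm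
    have total := (congrArg (fun st => List.foldl
        (fun (s : PySem.Set (Int × Int) × Int × Bool) c => pvBStep A0 Bm N M s c.1 c.2) st r)
        hstep).trans
      (ih S1 (mis || decide (pvEff A0 S1 c ≠ pvGetIJ Bm c.1 c.2)) hnd1 hSR1 hpair.of_cons)
    refine total.trans ?_
    rw [← hdec]
    refine Prod.ext rfl (Prod.ext rfl ?_)
    simp only [List.any_cons, heffc, Bool.or_assoc]


theorem pvTrivial (A0 Bm : List (List Int)) (N M : Int) (h : N ≤ 0 ∨ M ≤ 0) :
    min_operations_to_transform A0 Bm N M = min_operations_to_transform_alt A0 Bm N M := by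
  rcases h with hN | hM
  · simp only [min_operations_to_transform, min_operations_to_transform_alt]
    rw [PySem.List.pyRange_one_eq_nil (by omega : N - 2 ≤ (0 : Int)),
      PySem.List.pyRange_one_eq_nil (by omega : N ≤ (0 : Int))]
    simp
  · simp only [min_operations_to_transform, min_operations_to_transform_alt]
    rw [PySem.List.pyRange_one_eq_nil (by omega : M - 2 ≤ (0 : Int)),
      PySem.List.pyRange_one_eq_nil (by omega : M ≤ (0 : Int))]
    simp

set_option maxHeartbeats 1000000 in
theorem pvMain (A0 Bm : List (List Int)) (N M : Int)
    (hA : pvShape A0 N M) (_hB : pvShape Bm N M) :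
    min_operations_to_transform A0 Bm N M = min_operations_to_transform_alt A0 Bm N M := by
  have e1 : (PySem.List.pyRange 0 (N - 2) 1).flatMap
      (fun i => (PySem.List.pyRange 0 (M - 2) 1).map (fun j => (i, j))) = pvPairs 0 (N - 2) 0 (M - 2) := rfl
  have e2 : (PySem.List.pyRange 0 N 1).flatMap
      (fun i => (PySem.List.pyRange 0 M 1).map (fun j => (i, j))) = pvPairs 0 N 0 M := rfl
  have hcornerpairs : ∀ c ∈ pvPairs 0 (N - 2) 0 (M - 2), pvCorner N M c := by
    intro c hc
    rw [pvMemPairs] at hc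
    exact ⟨hc.1, by omega, hc.2.2.1, by omega⟩
  simp only [min_operations_to_transform, min_operations_to_transform_alt]
  rw [pvFoldlNested _ _ (fun (s : List (List Int) × Int) i j => pvAStep Bm s i j) (A0, 0), e1]
  have hinit : ((A0 : List (List Int)), (0 : Int))
      = (pvApply A0 ([] : List (Int × Int)), ((([] : List (Int × Int)).length : Nat) : Int)) := rfl
  rw [hinit, pvALoop A0 Bm N M hA (pvPairs 0 (N - 2) 0 (M - 2)) [] (by simp) hcornerpairs]
  dsimp only
  set Sfull := pvDec A0 Bm [] (pvPairs 0 (N - 2) 0 (M - 2)) with hSfullDef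
  have hSfull_corners : ∀ c ∈ Sfull, pvCorner N M c := by
    obtain ⟨T, hT, hsub⟩ := pvDecSublist A0 Bm (pvPairs 0 (N - 2) 0 (M - 2)) []
    rw [hSfullDef, hT]
    intro c hc
    simp only [List.nil_append] at hc
    exact hcornerpairs c (hsub.mem hc)
  rw [pvAnyNested _ _ (fun i j =>
    decide (pvGetIJ (pvApply A0 Sfull) i j ≠ pvGetIJ Bm i j)), e2]
  have hAnyA : (pvPairs 0 N 0 M).any (fun p =>
        decide (pvGetIJ (pvApply A0 Sfull) p.1 p.2 ≠ pvGetIJ Bm p.1 p.2))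
      = (pvPairs 0 N 0 M).any (fun p => decide (pvEff A0 Sfull p ≠ pvGetIJ Bm p.1 p.2)) := by
    refine pvAnyCongr _ _ _ ?_
    intro p hp
    rw [pvMemPairs] at hp
    have : pvGetIJ (pvApply A0 Sfull) p.1 p.2 = pvEff A0 Sfull p :=
      pvGetIJ_apply hA hSfull_corners ⟨hp.1, hp.2.1, hp.2.2.1, hp.2.2.2⟩
    rw [this]
  rw [hAnyA]
  -- B side
  rw [pvFoldlNested _ _ (fun (s : PySem.Set (Int × Int) × Int × Bool) i j => pvBStep A0 Bm N M s i j)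
    (PySem.Set.empty, 0, false), e2]
  have e3 : ((PySem.Set.empty : PySem.Set (Int × Int)), (0 : Int), false)
      = (([] : List (Int × Int)), ((List.length ([] : List (Int × Int)) : Nat) : Int), false) := rfl
  rw [e3]
  have hloopB := pvBLoop A0 Bm N M (pvPairs 0 N 0 M) [] false List.nodup_nil (by simp)
    (pvPairsPairwiseLex 0 N 0 M)
  rw [hloopB]
  dsimp only
  have hS' : pvDecAll A0 Bm N M [] (pvPairs 0 N 0 M) = Sfull := by
    rw [pvDecAllEqDec, pvPairsFilter, hSfullDef]
  rw [hS', Bool.false_or]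


-- ===== VERDICT (by name: the statement is the Claim_ definition above) =====
theorem min_operations_to_transform_spec : Claim_equal_min_operations_to_transform := by
  intro A B N M _ hpre
  unfold Spec_min_operations_to_transform
  rcases hpre with h | h | ⟨hA, hB⟩
  · exact (pvTrivial A B N M (Or.inl h)).symm ▸ rfl
  · exact (pvTrivial A B N M (Or.inr h)).symm ▸ rfl
  · exact pvMain A B N M hA hB
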